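-- pv_equiv track=rewrite | github.com/y-yigit/BigDataComputing | assignment4/assignment4.py | verify_fasta
-- ===== SOURCE A (Python) =====
-- def verify_fasta(lengths):
--     """
--     Receives line lengths and decides the validity
--     of the file by comparing the sequence lines with
--     the quality lines
--
--     lengths (list): Contains all the line lengths
--     Return
--     bool: Whether or not the FastQ file is valid
--     """
--     bool_list = []
--     count = 0
--     for length in lengths:
--         count+=1
--         # Sequence line
--         if count == 2:
--             temp_seq = length
--         # Quality line
--         if count == 4:
--             bool_list.append(temp_seq == length)
--             count = 0
--     if bool(all(bool_list)) and len(lengths)%4 == 0: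
--         return True
--     # Default return, assuming it is not a FastQ file
--     return False
-- ===== SOURCE B (Python) =====
-- def verify_fasta(lengths):
--     """Recursive decomposition: validate the first 4-line record
--     (sequence length == quality length), then recurse on the rest."""
--     if not lengths:
--         return True
--     if len(lengths) < 4:
--         return False
--     return lengths[1] == lengths[3] and verify_fasta(lengths[4:])
-- ===== Notes on version B (the rewrite author's own statement) =====
-- stated objective: simpler
-- what changed: Replaced the counter/bool_list accumulation loop with a direct recursion over 4-line records: compare the second and fourth line lengths of the first record and recurse on the remaining lines, with the empty list valid and a truncated record invalid.
import Mathlib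
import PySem

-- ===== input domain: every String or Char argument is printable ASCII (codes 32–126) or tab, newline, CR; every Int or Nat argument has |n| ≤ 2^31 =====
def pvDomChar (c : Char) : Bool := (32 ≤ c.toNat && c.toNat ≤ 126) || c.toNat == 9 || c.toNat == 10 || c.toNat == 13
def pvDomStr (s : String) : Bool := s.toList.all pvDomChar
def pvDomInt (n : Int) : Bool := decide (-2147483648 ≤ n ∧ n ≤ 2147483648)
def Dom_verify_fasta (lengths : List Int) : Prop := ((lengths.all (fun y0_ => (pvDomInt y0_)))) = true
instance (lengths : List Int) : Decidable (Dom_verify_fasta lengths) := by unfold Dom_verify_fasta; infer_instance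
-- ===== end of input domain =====

-- B replaces A's counter/bool_list loop by a recursion over 4-line records (simpler decomposition, same cost).

-- ===== PORT A =====
-- state = (bool_list, count, temp_seq); temp_seq starts as 0 but is always written (count hits 2) before it is read (count hits 4)
def stepA (s : List Bool × Int × Int) (length : Int) : List Bool × Int × Int :=
  let count := s.2.1 + 1
  let temp := if count = 2 then length else s.2.2
  if count = 4 then (s.1 ++ [temp == length], 0, temp)
  else (s.1, count, temp)

def verify_fasta (lengths : List Int) : Bool :=
  let st := lengths.foldl stepA ([], 0, 0)
  if st.1.all id && (lengths.length % 4 == 0) then true else false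

-- ===== PORT B =====
def verify_fasta_alt (lengths : List Int) : Bool :=
  if lengths.length = 0 then true
  else if lengths.length < 4 then false
  else (PySem.List.pyGet? lengths 1 == PySem.List.pyGet? lengths 3) &&
       verify_fasta_alt (PySem.List.slice lengths (some 4) none)
termination_by lengths.length
decreasing_by
  simp [PySem.List.slice_from]
  omega

-- ===== PRECONDITION & SPEC =====
def Spec_verify_fasta (lengths : List Int) (out : Bool) : Prop := out = verify_fasta_alt lengths
instance (lengths : List Int) (out : Bool) : Decidable (Spec_verify_fasta lengths out) := by unfold Spec_verify_fasta; infer_instance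

-- ===== CLAIM (what is proved, stated in full; the proofs are below) =====
def Claim_equal_verify_fasta : Prop := ∀ (lengths : List Int), Dom_verify_fasta lengths → Spec_verify_fasta lengths (verify_fasta lengths)

-- ===== LEMMAS AND PROOFS =====

theorem alt_nil : verify_fasta_alt [] = true := by
  unfold verify_fasta_alt; simp

theorem alt_short (l : List Int) (h0 : l ≠ []) (h4 : l.length < 4) :
    verify_fasta_alt l = false := by
  unfold verify_fasta_alt
  simp [List.length_eq_zero_iff, h0, h4]

theorem alt_cons4 (a b c d : Int) (rest : List Int) :
    verify_fasta_alt (a :: b :: c :: d :: rest) = ((b == d) && verify_fasta_alt rest) := by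
  rw [verify_fasta_alt]
  have hlen : (a :: b :: c :: d :: rest).length = rest.length + 4 := by simp
  rw [show PySem.List.slice (a :: b :: c :: d :: rest) (some 4) none = rest from by
        rw [show ((4 : Int)) = ((4 : Nat) : Int) from rfl, PySem.List.slice_from_natCast]; rfl,
      show ((1 : Int)) = ((1 : Nat) : Int) from rfl, show ((3 : Int)) = ((3 : Nat) : Int) from rfl,
      PySem.List.pyGet?_natCast, PySem.List.pyGet?_natCast]
  simp [hlen]

theorem step4 (bl : List Bool) (t a b c d : Int) (rest : List Int) :
    (a :: b :: c :: d :: rest).foldl stepA (bl, 0, t)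
      = rest.foldl stepA (bl ++ [b == d], 0, b) := by
  simp [List.foldl, stepA]

theorem main_lemma : ∀ (n : Nat) (l : List Int), l.length = n → ∀ (bl : List Bool) (t : Int),
    ((l.foldl stepA (bl, 0, t)).1.all id && (l.length % 4 == 0))
      = (bl.all id && verify_fasta_alt l) := by
  intro n
  induction n using Nat.strong_induction_on with
  | _ n ih =>
    intro l hl bl t
    match l with
    | [] => simp [alt_nil]
    | [a] => simp [alt_short [a] (by simp) (by simp)]
    | [a, b] => simp [alt_short [a, b] (by simp) (by simp)]
    | [a, b, c] => simp [alt_short [a, b, c] (by simp) (by simp)]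
    | a :: b :: c :: d :: rest =>
      rw [step4, alt_cons4]
      have hlen : (a :: b :: c :: d :: rest).length = rest.length + 4 := by simp
      have hm : ((a :: b :: c :: d :: rest).length % 4 == 0) = (rest.length % 4 == 0) := by
        rw [hlen, Nat.add_mod_right]
      rw [hm, ih rest.length (by omega) rest rfl (bl ++ [b == d]) b]
      simp [Bool.and_assoc]

-- ===== VERDICT (by name: the statement is the Claim_ definition above) =====
theorem verify_fasta_spec : Claim_equal_verify_fasta := by
  intro l _
  unfold Spec_verify_fasta verify_fasta
  have h := main_lemma l.length l rfl [] 0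
  simp only [List.all_nil, Bool.true_and] at h
  rw [show (if ((l.foldl stepA ([], 0, 0)).1.all id && (l.length % 4 == 0)) = true
        then true else false)
      = ((l.foldl stepA ([], 0, 0)).1.all id && (l.length % 4 == 0)) from by
    cases ((l.foldl stepA ([], 0, 0)).1.all id && (l.length % 4 == 0)) <;> simp]
  exact h
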